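-- pv_equiv track=rewrite | github.com/1a1a11a/PyMimircache | PyMimircache/A1a1a11a/script_diary/180116Shuffle.py | cal_dist
-- ===== SOURCE A (Python) =====
-- def cal_dist(dat):
--     last_vt = {}
--     dists = []
--     for n, r in enumerate(dat):
--         if r in last_vt:
--             dists.append(n - last_vt[r])
--         else:
--             dists.append(-1)
--         last_vt[r] = n
--     return dists, [0]*len(dat)
-- ===== SOURCE B (Python) =====
-- def cal_dist(dat):
--     pos = {}
--     for i, v in enumerate(dat):
--         pos.setdefault(v, []).append(i)
--     dists = [0] * len(dat)
--     for ps in pos.values():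
--         dists[ps[0]] = -1
--         for a, b in zip(ps, ps[1:]):
--             dists[b] = b - a
--     return dists, [0] * len(dat)
-- ===== Notes on version B (the rewrite author's own statement) =====
-- stated objective: alternative
-- what changed: Replaces the running last-seen dict (gap computed on the fly, output appended in order) by a two-phase decomposition: one pass groups the indices of each value into an occurrence table, then per-group adjacent-index gaps are scattered into a preallocated result list.
import Mathlib
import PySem

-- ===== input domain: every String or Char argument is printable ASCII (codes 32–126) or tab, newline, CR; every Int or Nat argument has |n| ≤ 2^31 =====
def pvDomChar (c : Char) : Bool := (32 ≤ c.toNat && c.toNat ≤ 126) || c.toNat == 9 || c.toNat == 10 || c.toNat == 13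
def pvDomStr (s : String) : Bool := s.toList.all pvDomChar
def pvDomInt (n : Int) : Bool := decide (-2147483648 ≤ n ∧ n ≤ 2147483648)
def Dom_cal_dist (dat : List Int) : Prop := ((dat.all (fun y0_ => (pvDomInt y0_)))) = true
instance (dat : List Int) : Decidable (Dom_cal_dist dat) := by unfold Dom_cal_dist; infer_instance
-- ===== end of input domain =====

-- B replaces A's running last-seen dict by a two-phase decomposition (group indices per value,
-- then scatter per-group gaps into a preallocated list); same cost, alternative structure.

-- ===== PORT A =====
-- loop body of A's 'for n, r in enumerate(dat)': state = (last_vt, dists)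
def pvAStep (st : PySem.Dict Int Int × List Int) (nr : Int × Int) : PySem.Dict Int Int × List Int :=
  match st.1.get? nr.2 with
  | some v => (st.1.insert nr.2 nr.1, st.2 ++ [nr.1 - v])
  | none => (st.1.insert nr.2 nr.1, st.2 ++ [-1])

def cal_dist (dat : List Int) : List Int × List Int :=
  (((PySem.List.enumerate dat).foldl pvAStep (PySem.Dict.empty, [])).2,
   List.replicate dat.length 0)

-- ===== PORT B =====
-- loop body of B's first pass: pos.setdefault(v, []).append(i)
def pvBBuildStep (pos : PySem.Dict Int (List Int)) (iv : Int × Int) : PySem.Dict Int (List Int) :=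
  pos.modify iv.2 [] (fun l => l ++ [iv.1])

-- loop body of B's inner 'for a, b in zip(ps, ps[1:])': dists[b] = b - a
def pvBGroupStep (ds : List Int) (ab : Int × Int) : List Int :=
  PySem.List.pySetD ds ab.2 (ab.2 - ab.1)

-- body of B's 'for ps in pos.values()': dists[ps[0]] = -1, then the zip loop
def pvWriteGroup (ds : List Int) (ps : List Int) : List Int :=
  (ps.zip (PySem.List.slice ps (some 1) none)).foldl pvBGroupStep
    (PySem.List.pySetD ds (PySem.List.pyGetD ps 0 0) (-1))

def cal_dist_alt (dat : List Int) : List Int × List Int :=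
  let pos := (PySem.List.enumerate dat).foldl pvBBuildStep PySem.Dict.empty
  (pos.values.foldl pvWriteGroup (List.replicate dat.length 0),
   List.replicate dat.length 0)

-- ===== PRECONDITION & SPEC =====
def Spec_cal_dist (dat : List Int) (out : List Int × List Int) : Prop := out = cal_dist_alt dat
instance (dat : List Int) (out : List Int × List Int) : Decidable (Spec_cal_dist dat out) := by unfold Spec_cal_dist; infer_instance

-- ===== CLAIM (what is proved, stated in full; the proofs are below) =====
def Claim_equal_cal_dist : Prop := ∀ (dat : List Int), Dom_cal_dist dat → Spec_cal_dist dat (cal_dist dat)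

-- ===== LEMMAS AND PROOFS =====

-- the (Nat) indices at which v occurs in dat, increasing
def pvOcc (dat : List Int) (v : Int) : List Nat :=
  (List.range dat.length).filter (fun j => dat.getD j 0 == v)

def pvOccI (dat : List Int) (v : Int) : List Int := (pvOcc dat v).map (fun m : Nat => (m : Int))

-- the gap A stores at index j: j minus the last earlier occurrence of dat[j], else -1
def pvGap (dat : List Int) (j : Nat) : Int :=
  match ((List.range j).filter (fun k => dat.getD k 0 == dat.getD j 0)).getLast? with
  | some m => (j : Int) - (m : Int)
  | none => -1

-- the (index, value) writes B performs for one group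
def pvWrites (ps : List Int) : List (Int × Int) :=
  (PySem.List.pyGetD ps 0 0, -1) :: (ps.zip ps.tail).map (fun ab => (ab.2, ab.2 - ab.1))

def pvApply (ds : List Int) (ws : List (Int × Int)) : List Int :=
  ws.foldl (fun ds w => PySem.List.pySetD ds w.1 w.2) ds

def pvW (dat : List Int) : List (Int × Int) :=
  ((PySem.List.dedup dat).map (fun v => pvOccI dat v)).flatMap pvWrites

-- ---- small getD facts ----
lemma pv_getD_append_cons (l1 : List Int) (r : Int) (l2 : List Int) :
    (l1 ++ r :: l2).getD l1.length 0 = r := by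
  rw [List.getD_append_right _ _ _ _ (le_refl _)]
  simp

-- ---- A side ----
lemma pv_aloop (rest : List Int) : ∀ (pref : List Int) (d : PySem.Dict Int Int) (acc : List Int),
    (∀ r : Int, d.get? r =
      (((List.range pref.length).filter (fun k => pref.getD k 0 == r)).getLast?).map (fun m => ((m : Nat) : Int))) →
    ((PySem.List.enumerate rest (pref.length : Int)).foldl pvAStep (d, acc)).2
      = acc ++ (List.range rest.length).map (fun k => pvGap (pref ++ rest) (pref.length + k)) := by
  induction rest with
  | nil => intro pref d acc _; simp [PySem.List.enumerate_nil]
  | cons r rest ih =>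
    intro pref d acc hinv
    rw [PySem.List.enumerate_cons, List.foldl_cons]
    have hgap : pvGap (pref ++ r :: rest) pref.length
        = (match (((List.range pref.length).filter (fun k => pref.getD k 0 == r)).getLast?) with
          | some m => (pref.length : Int) - (m : Int)
          | none => -1) := by
      unfold pvGap
      rw [pv_getD_append_cons pref r rest]
      have h2 : (List.range pref.length).filter (fun k => (pref ++ r :: rest).getD k 0 == r)
          = (List.range pref.length).filter (fun k => pref.getD k 0 == r) :=
        List.filter_congr (fun k hk => by
          rw [List.getD_append _ _ _ _ (List.mem_range.mp hk)])
      rw [h2]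
    have hinv' : ∀ r' : Int, (d.insert r (pref.length : Int)).get? r' =
        (((List.range (pref ++ [r]).length).filter (fun k => (pref ++ [r]).getD k 0 == r')).getLast?).map
          (fun m => ((m : Nat) : Int)) := by
      intro r'
      by_cases hr : r' = r
      · subst hr
        rw [PySem.Dict.get?_insert_self]
        have h5 : (List.range (pref ++ [r']).length).filter (fun k => (pref ++ [r']).getD k 0 == r')
            = ((List.range pref.length).filter (fun k => (pref ++ [r']).getD k 0 == r')) ++ [pref.length] := by
          rw [List.length_append, List.length_singleton, List.range_succ, List.filter_append]
          congr 1
          simp [pv_getD_append_cons pref r' []]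
        rw [h5, List.getLast?_concat]
        rfl
      · rw [PySem.Dict.get?_insert_of_ne _ _ hr, hinv r']
        have h5 : (List.range (pref ++ [r]).length).filter (fun k => (pref ++ [r]).getD k 0 == r')
            = (List.range pref.length).filter (fun k => pref.getD k 0 == r') := by
          rw [List.length_append, List.length_singleton, List.range_succ, List.filter_append]
          have h3 : (List.range pref.length).filter (fun k => (pref ++ [r]).getD k 0 == r')
              = (List.range pref.length).filter (fun k => pref.getD k 0 == r') :=
            List.filter_congr (fun k hk => by
              rw [List.getD_append _ _ _ _ (List.mem_range.mp hk)])
          have h4 : ([pref.length].filter (fun k => (pref ++ [r]).getD k 0 == r')) = [] := by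
            simp [pv_getD_append_cons pref r [], hr, Ne.symm hr]
          rw [h3, h4, List.append_nil]
        rw [h5]
    have hs : (pref.length : Int) + 1 = ((pref ++ [r]).length : Int) := by
      simp
    have hrange : (List.range (r :: rest).length).map (fun k => pvGap (pref ++ r :: rest) (pref.length + k))
        = pvGap (pref ++ r :: rest) pref.length
          :: (List.range rest.length).map (fun k => pvGap ((pref ++ [r]) ++ rest) ((pref ++ [r]).length + k)) := by
      rw [List.length_cons, List.range_succ_eq_map, List.map_cons, List.map_map]
      congr 1
      apply List.map_congr_left
      intro k _
      show pvGap (pref ++ r :: rest) (pref.length + Nat.succ k)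
        = pvGap (pref ++ [r] ++ rest) ((pref ++ [r]).length + k)
      have hl : pref ++ [r] ++ rest = pref ++ r :: rest := by simp
      have hn : (pref ++ [r]).length + k = pref.length + Nat.succ k := by
        simp only [List.length_append, List.length_singleton, Nat.succ_eq_add_one]
        omega
      rw [hl, hn]
    cases hL : (((List.range pref.length).filter (fun k => pref.getD k 0 == r)).getLast?) with
    | none =>
      have hstep : pvAStep (d, acc) ((pref.length : Int), r) = (d.insert r (pref.length : Int), acc ++ [-1]) := by
        simp only [pvAStep, hinv r, hL, Option.map_none]
      rw [hstep, hs, ih (pref ++ [r]) _ _ hinv', hrange]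
      rw [hgap, hL]
      simp
    | some m =>
      have hstep : pvAStep (d, acc) ((pref.length : Int), r)
          = (d.insert r (pref.length : Int), acc ++ [(pref.length : Int) - (m : Int)]) := by
        simp only [pvAStep, hinv r, hL, Option.map_some]
      rw [hstep, hs, ih (pref ++ [r]) _ _ hinv', hrange]
      rw [hgap, hL]
      simp

lemma pv_A_fst (dat : List Int) :
    (cal_dist dat).1 = (List.range dat.length).map (pvGap dat) := by
  have h := pv_aloop dat [] PySem.Dict.empty []
    (by intro r; simp [PySem.Dict.empty, PySem.Dict.get?])
  simpa [cal_dist] using h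

-- ---- B side: the occurrence table ----
lemma pv_enumerate_snoc (l : List Int) (x : Int) : ∀ (s : Int),
    PySem.List.enumerate (l ++ [x]) s = PySem.List.enumerate l s ++ [(s + l.length, x)] := by
  induction l with
  | nil => intro s; simp [PySem.List.enumerate_cons, PySem.List.enumerate_nil]
  | cons y t ih =>
    intro s
    rw [List.cons_append, PySem.List.enumerate_cons, PySem.List.enumerate_cons, ih (s + 1)]
    simp only [List.cons_append, List.length_cons]
    congr 2
    push_cast
    ring

lemma pv_dedup_snoc (l : List Int) (x : Int) :
    PySem.List.dedup (l ++ [x]) = if x ∈ l then PySem.List.dedup l else PySem.List.dedup l ++ [x] := by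
  have hc : PySem.Set.contains (PySem.Set.ofList l) x = decide (x ∈ l) := by
    by_cases hx : x ∈ l
    · have hm : x ∈ PySem.Set.ofList l := (PySem.Set.mem_ofList l x).mpr hx
      simp [PySem.Set.contains, hm, hx, List.contains_iff_mem]
    · have hm : x ∉ PySem.Set.ofList l := fun h => hx ((PySem.Set.mem_ofList l x).mp h)
      simp [PySem.Set.contains, hm, hx, List.contains_iff_mem]
  show List.foldl PySem.Set.add PySem.Set.empty (l ++ [x]) = _
  rw [List.foldl_append, List.foldl_cons, List.foldl_nil]
  show PySem.Set.add (PySem.Set.ofList l) x = _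
  rw [PySem.Set.add, hc]
  by_cases hx : x ∈ l <;> simp [hx] <;> rfl

lemma pv_occ_snoc (dat : List Int) (x v : Int) :
    pvOcc (dat ++ [x]) v = pvOcc dat v ++ (if x = v then [dat.length] else []) := by
  unfold pvOcc
  rw [List.length_append, List.length_singleton, List.range_succ, List.filter_append]
  congr 1
  · exact List.filter_congr (fun k hk => by
      rw [List.getD_append _ _ _ _ (List.mem_range.mp hk)])
  · by_cases hxv : x = v <;>
      simp [List.filter_cons, pv_getD_append_cons dat x [], hxv]

lemma pv_mem_occ (dat : List Int) (v : Int) (m : Nat) :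
    m ∈ pvOcc dat v ↔ m < dat.length ∧ dat.getD m 0 = v := by
  simp [pvOcc, List.mem_filter, List.mem_range, and_comm]

lemma pv_mem_dedup (l : List Int) (x : Int) : x ∈ PySem.List.dedup l ↔ x ∈ l :=
  PySem.Set.mem_ofList l x

-- occurrences of an absent value: none
lemma pv_occ_of_not_mem (dat : List Int) (v : Int) (hv : v ∉ dat) : pvOcc dat v = [] := by
  unfold pvOcc
  rw [List.filter_eq_nil_iff]
  intro k hk
  have hklt := List.mem_range.mp hk
  simp only [beq_iff_eq]
  intro hkv
  exact hv (by rw [← hkv, List.getD_eq_getElem _ _ hklt]; exact List.getElem_mem hklt)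

-- insert into a dict of the mapped form stays in mapped form
lemma pv_insert_map (g g' : Int → List Int) (m : List Int) (x : Int) (w : List Int)
    (hw : w = g' x) (hg : ∀ v ∈ m, v ≠ x → g v = g' v) :
    (PySem.Dict.mk (m.map (fun v => (v, g v)))).insert x w
      = PySem.Dict.mk ((if x ∈ m then m else m ++ [x]).map (fun v => (v, g' v))) := by
  have hcont : (PySem.Dict.mk (m.map (fun v => (v, g v)))).contains x = decide (x ∈ m) := by
    by_cases hx : x ∈ m
    · simp [PySem.Dict.contains, List.any_map, Function.comp_def, List.any_eq_true,
        beq_iff_eq, hx]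
    · simp only [PySem.Dict.contains, List.any_map, Function.comp_def, List.any_eq_true,
        beq_iff_eq, hx, decide_false]
      simp only [List.any_eq_false, beq_iff_eq]
      intro v hv h
      exact hx (h ▸ hv)
  by_cases hx : x ∈ m
  · rw [PySem.Dict.insert, hcont]
    simp only [hx, decide_true, if_true]
    apply PySem.Dict.ext
    show (m.map (fun v => (v, g v))).map _ = _
    rw [List.map_map]
    apply List.map_congr_left
    intro v hv
    by_cases hvx : v = x
    · subst hvx; simp [hw]
    · simp [hvx, hg v hv hvx]
  · rw [PySem.Dict.insert, hcont]
    simp only [hx, decide_false, Bool.false_eq_true, if_false]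
    apply PySem.Dict.ext
    show m.map (fun v => (v, g v)) ++ [(x, w)] = (m ++ [x]).map _
    rw [List.map_append, List.map_singleton]
    congr 1
    · exact List.map_congr_left (fun v hv => by
        have : v ≠ x := fun h => hx (h ▸ hv)
        simp [hg v hv this])
    · simp [hw]


lemma pv_get?_map (g : Int → List Int) : ∀ (m : List Int) (x : Int),
    (PySem.Dict.mk (m.map (fun v => (v, g v)))).get? x = if x ∈ m then some (g x) else none := by
  intro m
  induction m with
  | nil => intro x; simp [PySem.Dict.get?]
  | cons v t ih =>
    intro x
    rw [List.map_cons, PySem.Dict.get?_mk_cons, ih x]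
    by_cases hv : v = x
    · subst hv; simp
    · simp [hv, Ne.symm hv]

lemma pv_build_items (dat : List Int) :
    ((PySem.List.enumerate dat).foldl pvBBuildStep PySem.Dict.empty).items
      = (PySem.List.dedup dat).map (fun v => (v, pvOccI dat v)) := by
  induction dat using List.reverseRecOn with
  | nil => simp [PySem.List.enumerate_nil, PySem.Dict.empty, PySem.List.dedup, PySem.Set.ofList,
      PySem.Set.empty]
  | append_singleton l x ih =>
    rw [pv_enumerate_snoc l x 0, List.foldl_append, List.foldl_cons, List.foldl_nil]
    have hprev : (PySem.List.enumerate l 0).foldl pvBBuildStep PySem.Dict.empty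
        = PySem.Dict.mk ((PySem.List.dedup l).map (fun v => (v, pvOccI l v))) :=
      PySem.Dict.ext ih
    rw [hprev]
    show ((PySem.Dict.mk ((PySem.List.dedup l).map (fun v => (v, pvOccI l v)))).modify x []
      (fun ps => ps ++ [(0 : Int) + (l.length : Int)])).items = _
    rw [PySem.Dict.modify]
    have hgetD : (PySem.Dict.mk ((PySem.List.dedup l).map (fun v => (v, pvOccI l v)))).getD x []
        = pvOccI l x := by
      rw [PySem.Dict.getD, pv_get?_map]
      by_cases hxl : x ∈ l
      · rw [if_pos ((pv_mem_dedup l x).mpr hxl), Option.getD_some]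
      · rw [if_neg (fun h => hxl ((pv_mem_dedup l x).mp h))]
        simp [pvOccI, pv_occ_of_not_mem l x hxl]
    rw [hgetD]
    have hw : pvOccI l x ++ [(0 : Int) + (l.length : Int)] = pvOccI (l ++ [x]) x := by
      rw [pvOccI, pvOccI, pv_occ_snoc l x x, if_pos rfl, List.map_append]
      simp
    have hg : ∀ v ∈ PySem.List.dedup l, v ≠ x → pvOccI l v = pvOccI (l ++ [x]) v := by
      intro v _ hvx
      rw [pvOccI, pvOccI, pv_occ_snoc l x v, if_neg (Ne.symm hvx), List.append_nil]
    rw [pv_insert_map (pvOccI l) (pvOccI (l ++ [x])) (PySem.List.dedup l) x _ hw hg]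
    have hkeys : (if x ∈ PySem.List.dedup l then PySem.List.dedup l else PySem.List.dedup l ++ [x])
        = PySem.List.dedup (l ++ [x]) := by
      rw [pv_dedup_snoc l x]
      by_cases hx : x ∈ l
      · simp [hx, (pv_mem_dedup l x).mpr hx]
      · have hnd : x ∉ PySem.List.dedup l := fun h => hx ((pv_mem_dedup l x).mp h)
        simp [hx, hnd]
    rw [hkeys]

-- ---- B side: scatter ----
lemma pv_writeGroup_eq (ds ps : List Int) : pvWriteGroup ds ps = pvApply ds (pvWrites ps) := by
  unfold pvWriteGroup pvWrites pvApply
  rw [PySem.List.slice_from_one, List.foldl_cons, List.foldl_map]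
  rfl

lemma pv_foldl_writeGroups (gs : List (List Int)) : ∀ (ds : List Int),
    gs.foldl pvWriteGroup ds = pvApply ds (gs.flatMap pvWrites) := by
  have happ : ∀ (a b : List (Int × Int)) (ds : List Int),
      pvApply ds (a ++ b) = pvApply (pvApply ds a) b := by
    intro a b ds; simp [pvApply, List.foldl_append]
  induction gs with
  | nil => intro ds; simp [pvApply]
  | cons g t ih =>
    intro ds
    rw [List.foldl_cons, List.flatMap_cons, happ, pv_writeGroup_eq, ih]

lemma pv_apply_length (ws : List (Int × Int)) : ∀ (ds : List Int), (pvApply ds ws).length = ds.length := by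
  induction ws with
  | nil => intro ds; rfl
  | cons w t ih =>
    intro ds
    rw [show pvApply ds (w :: t) = pvApply (PySem.List.pySetD ds w.1 w.2) t from rfl, ih,
      PySem.List.length_pySetD]

lemma pv_apply_getD_not_mem (ws : List (Int × Int)) : ∀ (ds : List Int) (j : Nat),
    (∀ w ∈ ws, 0 ≤ w.1) → ((j : Int) ∉ ws.map Prod.fst) →
    (pvApply ds ws).getD j 0 = ds.getD j 0 := by
  induction ws with
  | nil => intro ds j _ _; rfl
  | cons w t ih =>
    intro ds j h0 hnm
    rw [List.map_cons, List.mem_cons] at hnm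
    push_neg at hnm
    rw [show pvApply ds (w :: t) = pvApply (PySem.List.pySetD ds w.1 w.2) t from rfl,
      ih _ j (fun u hu => h0 u (List.mem_cons_of_mem _ hu)) hnm.2]
    have h0w : 0 ≤ w.1 := h0 w (List.mem_cons_self ..)
    rw [PySem.List.pySetD_of_nonneg _ _ h0w]
    have hne : w.1.toNat ≠ j := by
      intro h
      exact hnm.1 (by rw [← h, Int.toNat_of_nonneg h0w])
    rw [List.getD_eq_getElem?_getD, List.getD_eq_getElem?_getD, List.getElem?_set_ne hne]

lemma pv_apply_getD_mem (ws : List (Int × Int)) : ∀ (ds : List Int) (j : Nat) (x : Int),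
    (ws.map Prod.fst).Nodup → (∀ w ∈ ws, 0 ≤ w.1 ∧ w.1 < (ds.length : Int)) →
    ((j : Int), x) ∈ ws →
    (pvApply ds ws).getD j 0 = x := by
  induction ws with
  | nil => intro ds j x _ _ h; cases h
  | cons w t ih =>
    intro ds j x hnd h0 hm
    rw [List.map_cons] at hnd
    have hnd' := List.nodup_cons.mp hnd
    rw [show pvApply ds (w :: t) = pvApply (PySem.List.pySetD ds w.1 w.2) t from rfl]
    rcases List.mem_cons.mp hm with heq | hmt
    · have hw1 : w.1 = (j : Int) := by rw [← heq]
      have hw2 : w.2 = x := by rw [← heq]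
      have hj : (j : Int) ∉ t.map Prod.fst := hw1 ▸ hnd'.1
      rw [pv_apply_getD_not_mem t _ j (fun u hu => (h0 u (List.mem_cons_of_mem _ hu)).1) hj]
      have hjlen : j < ds.length := by
        have := (h0 w (List.mem_cons_self ..)).2
        rw [hw1] at this
        exact_mod_cast this
      rw [hw1, hw2, PySem.List.pySetD_of_nonneg _ _ (Int.natCast_nonneg j), Int.toNat_natCast,
        List.getD_eq_getElem?_getD, List.getElem?_set_self hjlen, Option.getD_some]
    · have hb : ∀ u ∈ t, 0 ≤ u.1 ∧ u.1 < ((PySem.List.pySetD ds w.1 w.2).length : Int) := by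
        intro u hu
        rw [PySem.List.length_pySetD]
        exact h0 u (List.mem_cons_of_mem _ hu)
      exact ih _ j x hnd'.2 hb hmt

-- ---- B side: the writes cover each index exactly once, with the gap value ----
lemma pv_writes_fst (p : Int) (t : List Int) : (pvWrites (p :: t)).map Prod.fst = p :: t := by
  unfold pvWrites
  rw [List.map_cons, List.map_map]
  have h1 : (Prod.fst ∘ fun ab : Int × Int => (ab.2, ab.2 - ab.1)) = Prod.snd := by
    funext ab; rfl
  rw [h1]
  have h2 : ((p :: t).zip (p :: t).tail).map Prod.snd = t := by
    rw [show (p :: t).tail = t from rfl]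
    exact List.map_snd_zip (by simp)
  rw [h2, PySem.List.pyGetD_zero_cons]

lemma pv_adj_mem_zip : ∀ (ps : List Nat), ps.Pairwise (· < ·) → ∀ a b : Nat, a ∈ ps → b ∈ ps → a < b →
    (∀ c ∈ ps, ¬(a < c ∧ c < b)) → (a, b) ∈ ps.zip ps.tail := by
  intro ps
  induction ps with
  | nil => intro _ a b ha _ _ _; cases ha
  | cons p t ih =>
    intro hpw a b ha hb hab hno
    cases t with
    | nil =>
      rw [List.mem_singleton] at ha hb
      omega
    | cons q t' =>
      have hpw' := List.pairwise_cons.mp hpw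
      rcases List.mem_cons.mp ha with rfl | hat
      · have hpq : a < q := hpw'.1 q (List.mem_cons_self ..)
        have hb' : b ∈ q :: t' := by
          rcases List.mem_cons.mp hb with h | h
          · omega
          · exact h
        have hq_le : q ≤ b := by
          rcases List.mem_cons.mp hb' with h | hbt'
          · omega
          · exact le_of_lt ((List.pairwise_cons.mp hpw'.2).1 b hbt')
        have hnoq : ¬ (a < q ∧ q < b) := hno q (List.mem_cons_of_mem _ (List.mem_cons_self ..))
        have hqb : b = q := by omega
        subst hqb
        rw [show (a :: b :: t').tail = b :: t' from rfl, List.zip_cons_cons]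
        exact List.mem_cons_self ..
      · have hb' : b ∈ q :: t' := by
          rcases List.mem_cons.mp hb with h | h
          · have : p < a := hpw'.1 a hat
            omega
          · exact h
        have hres := ih hpw'.2 a b hat hb' hab (fun c hc => hno c (List.mem_cons_of_mem _ hc))
        rw [show (p :: q :: t').tail = q :: t' from rfl, List.zip_cons_cons]
        exact List.mem_cons_of_mem _ (by simpa using hres)

lemma pv_occ_pairwise (dat : List Int) (v : Int) : (pvOcc dat v).Pairwise (· < ·) :=
  List.Pairwise.filter _ List.pairwise_lt_range

lemma pv_mem_W (dat : List Int) (j : Nat) (hj : j < dat.length) :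
    ((j : Int), pvGap dat j) ∈ pvW dat := by
  have hvmem : dat.getD j 0 ∈ dat := by
    rw [List.getD_eq_getElem _ _ hj]; exact List.getElem_mem hj
  have hded : dat.getD j 0 ∈ PySem.List.dedup dat := (PySem.Set.mem_ofList _ _).mpr hvmem
  have hgrp : pvOccI dat (dat.getD j 0) ∈ (PySem.List.dedup dat).map (fun v => pvOccI dat v) :=
    List.mem_map_of_mem hded
  have hjocc : j ∈ pvOcc dat (dat.getD j 0) := (pv_mem_occ dat _ j).mpr ⟨hj, rfl⟩
  apply List.mem_flatMap.mpr
  refine ⟨pvOccI dat (dat.getD j 0), hgrp, ?_⟩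
  cases hL : (((List.range j).filter (fun k => dat.getD k 0 == dat.getD j 0)).getLast?) with
  | none =>
    have hgap : pvGap dat j = -1 := by unfold pvGap; rw [hL]
    have hLnil := List.getLast?_eq_none_iff.mp hL
    cases hps : pvOcc dat (dat.getD j 0) with
    | nil => rw [hps] at hjocc; cases hjocc
    | cons p t =>
      have hpj : p = j := by
        have hpmem : p ∈ pvOcc dat (dat.getD j 0) := by
          rw [hps]; exact List.mem_cons_self ..
        have hp := (pv_mem_occ dat _ p).mp hpmem
        by_contra hne
        rcases Nat.lt_or_ge p j with hlt | hge
        · have hpf : p ∈ (List.range j).filter (fun k => dat.getD k 0 == dat.getD j 0) := by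
            exact List.mem_filter.mpr ⟨List.mem_range.mpr hlt, beq_iff_eq.mpr hp.2⟩
          rw [hLnil] at hpf; cases hpf
        · have hj' := hps ▸ hjocc
          rcases List.mem_cons.mp hj' with h | h
          · exact hne h.symm
          · have := (List.pairwise_cons.mp (hps ▸ pv_occ_pairwise dat (dat.getD j 0))).1 j h
            omega
      have hocci : pvOccI dat (dat.getD j 0) = (j : Int) :: t.map (fun m : Nat => (m : Int)) := by
        rw [pvOccI, hps, hpj, List.map_cons]
      rw [hocci, hgap]
      unfold pvWrites
      rw [PySem.List.pyGetD_zero_cons]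
      exact List.mem_cons_self ..
  | some m =>
    have hgap : pvGap dat j = (j : Int) - (m : Int) := by unfold pvGap; rw [hL]
    have hmmem := List.mem_of_getLast? hL
    have hm : m < j ∧ dat.getD m 0 = dat.getD j 0 := by
      simpa [List.mem_filter, List.mem_range] using hmmem
    have hmocc : m ∈ pvOcc dat (dat.getD j 0) := (pv_mem_occ dat _ m).mpr ⟨lt_trans hm.1 hj, hm.2⟩
    obtain ⟨L', hL'⟩ := List.getLast?_eq_some_iff.mp hL
    have hmax : ∀ k ∈ (List.range j).filter (fun k => dat.getD k 0 == dat.getD j 0), k ≤ m := by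
      intro k hk
      have hpwf : ((List.range j).filter (fun k => dat.getD k 0 == dat.getD j 0)).Pairwise (· < ·) :=
        List.Pairwise.filter _ List.pairwise_lt_range
      rw [hL'] at hk hpwf
      rcases List.mem_append.mp hk with h | h
      · exact le_of_lt ((List.pairwise_append.mp hpwf).2.2 k h m (List.mem_singleton.mpr rfl))
      · rw [List.mem_singleton] at h; omega
    have hadj : (m, j) ∈ (pvOcc dat (dat.getD j 0)).zip (pvOcc dat (dat.getD j 0)).tail := by
      apply pv_adj_mem_zip _ (pv_occ_pairwise dat _) m j hmocc hjocc hm.1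
      intro c hc hcc
      have hcp := (pv_mem_occ dat _ c).mp hc
      have hcf : c ∈ (List.range j).filter (fun k => dat.getD k 0 == dat.getD j 0) := by
        exact List.mem_filter.mpr ⟨List.mem_range.mpr hcc.2, beq_iff_eq.mpr hcp.2⟩
      have := hmax c hcf
      omega
    rw [hgap]
    unfold pvWrites
    apply List.mem_cons_of_mem
    apply List.mem_map.mpr
    refine ⟨((m : Int), (j : Int)), ?_, rfl⟩
    unfold pvOccI
    rw [← List.map_tail, List.zip_map]
    exact List.mem_map_of_mem hadj

-- for a value of dat, the indices its group writes are exactly its occurrence list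
lemma pv_writes_fst_occ (dat : List Int) (v : Int) (hv : v ∈ dat) :
    (pvWrites (pvOccI dat v)).map Prod.fst = pvOccI dat v := by
  obtain ⟨i, hi, hival⟩ := List.mem_iff_getElem.mp hv
  have hiocc : i ∈ pvOcc dat v :=
    (pv_mem_occ dat v i).mpr ⟨hi, by rw [List.getD_eq_getElem _ _ hi, hival]⟩
  cases hps : pvOcc dat v with
  | nil => rw [hps] at hiocc; cases hiocc
  | cons p t =>
    rw [pvOccI, hps, List.map_cons]
    exact pv_writes_fst _ _

lemma pv_occI_nodup (dat : List Int) (v : Int) : (pvOccI dat v).Nodup := by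
  unfold pvOccI
  exact List.Nodup.map (fun _ _ h => by exact_mod_cast h)
    ((pv_occ_pairwise dat v).imp (fun h => Nat.ne_of_lt h))

lemma pv_mem_occI (dat : List Int) (v : Int) (b : Int) :
    b ∈ pvOccI dat v → ∃ k : Nat, k < dat.length ∧ dat.getD k 0 = v ∧ (k : Int) = b := by
  intro hb
  obtain ⟨k, hk, rfl⟩ := List.mem_map.mp hb
  have := (pv_mem_occ dat v k).mp hk
  exact ⟨k, this.1, this.2, rfl⟩

lemma pv_nodup_aux (dat : List Int) : ∀ (m : List Int), m.Nodup → (∀ v ∈ m, v ∈ dat) →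
    ((m.flatMap (fun v => pvWrites (pvOccI dat v))).map Prod.fst).Nodup := by
  intro m
  induction m with
  | nil => intro _ _; simp
  | cons v t ih =>
    intro hnd hsub
    have hnd' := List.nodup_cons.mp hnd
    have hvdat := hsub v (List.mem_cons_self ..)
    rw [List.flatMap_cons, List.map_append, pv_writes_fst_occ dat v hvdat]
    apply List.nodup_append.mpr
    refine ⟨pv_occI_nodup dat v, ih hnd'.2 (fun u hu => hsub u (List.mem_cons_of_mem _ hu)), ?_⟩
    intro a ha b hb hab
    obtain ⟨ka, hka, hkav, hkaa⟩ := pv_mem_occI dat v a ha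
    obtain ⟨w, hw, rfl⟩ := List.mem_map.mp hb
    obtain ⟨v', hv't, hwv'⟩ := List.mem_flatMap.mp hw
    have hv'dat := hsub v' (List.mem_cons_of_mem _ hv't)
    have hbocc : w.1 ∈ pvOccI dat v' := by
      rw [← pv_writes_fst_occ dat v' hv'dat]
      exact List.mem_map_of_mem hwv'
    obtain ⟨kb, hkb, hkbv, hkbb⟩ := pv_mem_occI dat v' w.1 hbocc
    apply hnd'.1
    have hk : ka = kb := by
      have : (ka : Int) = (kb : Int) := by rw [hkaa, hkbb, hab]
      exact_mod_cast this
    have : v = v' := by rw [← hkav, ← hkbv, hk]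
    rw [this]
    exact hv't

lemma pv_W_fst_nodup (dat : List Int) : ((pvW dat).map Prod.fst).Nodup := by
  unfold pvW
  rw [List.flatMap_map]
  exact pv_nodup_aux dat (PySem.List.dedup dat) (PySem.Set.nodup_ofList dat)
    (fun v hv => (PySem.Set.mem_ofList dat v).mp hv)

lemma pv_W_bounds (dat : List Int) : ∀ w ∈ pvW dat, 0 ≤ w.1 ∧ w.1 < (dat.length : Int) := by
  intro w hw
  unfold pvW at hw
  rw [List.flatMap_map] at hw
  obtain ⟨v, hv, hwv⟩ := List.mem_flatMap.mp hw
  have hvdat : v ∈ dat := (PySem.Set.mem_ofList dat v).mp hv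
  have h1 : w.1 ∈ (pvWrites (pvOccI dat v)).map Prod.fst := List.mem_map_of_mem hwv
  rw [pv_writes_fst_occ dat v hvdat] at h1
  obtain ⟨k, hk, hkv, hkb⟩ := pv_mem_occI dat v w.1 h1
  rw [← hkb]
  exact ⟨Int.natCast_nonneg k, by exact_mod_cast hk⟩

lemma pv_B_fst (dat : List Int) :
    (cal_dist_alt dat).1 = pvApply (List.replicate dat.length 0) (pvW dat) := by
  have h0 : (cal_dist_alt dat).1
      = ((PySem.List.enumerate dat).foldl pvBBuildStep PySem.Dict.empty).values.foldl
          pvWriteGroup (List.replicate dat.length 0) := rfl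
  have hv : ((PySem.List.enumerate dat).foldl pvBBuildStep PySem.Dict.empty).values
      = (PySem.List.dedup dat).map (fun v => pvOccI dat v) := by
    show ((PySem.List.enumerate dat).foldl pvBBuildStep PySem.Dict.empty).items.map _ = _
    rw [pv_build_items dat, List.map_map]
    rfl
  rw [h0, hv, pv_foldl_writeGroups]
  rfl

-- ===== VERDICT (by name: the statement is the Claim_ definition above) =====
theorem cal_dist_spec : Claim_equal_cal_dist := by
  intro dat _
  unfold Spec_cal_dist
  have hA := pv_A_fst dat
  have hB := pv_B_fst dat
  have hfst : (cal_dist dat).1 = (cal_dist_alt dat).1 := by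
    rw [hA, hB]
    apply List.ext_getElem
    · simp [pv_apply_length]
    · intro j h1 h2
      have hj : j < dat.length := by simpa using h1
      have hmem := pv_mem_W dat j hj
      have := pv_apply_getD_mem (pvW dat) (List.replicate dat.length 0) j (pvGap dat j)
        (pv_W_fst_nodup dat) (by simpa [List.length_replicate] using pv_W_bounds dat) hmem
      have hlen : j < (pvApply (List.replicate dat.length 0) (pvW dat)).length := h2
      rw [List.getD_eq_getElem _ _ hlen] at this
      simp only [List.getElem_map, List.getElem_range]
      rw [← this]
  have hsnd : (cal_dist dat).2 = (cal_dist_alt dat).2 := rfl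
  exact Prod.ext hfst hsnd
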